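-- pv_equiv track=rewrite | github.com/Andrii-hotfix/Math-Algorithms | Algorithms.py | lambda_matrix
-- ===== SOURCE A (Python) =====
-- def lambda_matrix(mod):
-- 	l_m = []
-- 	for i in range(mod):
-- 		line = []
-- 		for j in range(mod):
-- 			if (2**i+2**j)%(mod+1)==0 or (2**i+2**j)%(mod+1)==1:
-- 				line.append(1)
-- 			else:
-- 				line.append(0)
-- 		l_m.append(line)
-- 	return l_m
-- ===== SOURCE B (Python) =====
-- def lambda_matrix(mod):
--     M = mod + 1
--     res = [pow(2, k, M) for k in range(mod)]
--     index = {}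
--     for j, r in enumerate(res):
--         index.setdefault(r, []).append(j)
--     l_m = []
--     for r in res:
--         t0 = (-r) % M
--         t1 = (1 - r) % M
--         row = [0] * mod
--         cols = index.get(t0, [])
--         if t1 != t0:
--             cols = cols + index.get(t1, [])
--         for j in cols:
--             row[j] = 1
--         l_m.append(row)
--     return l_m
-- ===== Notes on version B (the rewrite author's own statement) =====
-- stated objective: faster
-- what changed: Instead of testing every (i,j) pair with huge exact powers 2**i, B precomputes the residues pow(2,k,mod+1) once, builds an inverted index from residue to its column indices, and fills each row by zero-initialising it and setting 1 only at the columns gathered from the two target-residue buckets.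
import Mathlib
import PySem

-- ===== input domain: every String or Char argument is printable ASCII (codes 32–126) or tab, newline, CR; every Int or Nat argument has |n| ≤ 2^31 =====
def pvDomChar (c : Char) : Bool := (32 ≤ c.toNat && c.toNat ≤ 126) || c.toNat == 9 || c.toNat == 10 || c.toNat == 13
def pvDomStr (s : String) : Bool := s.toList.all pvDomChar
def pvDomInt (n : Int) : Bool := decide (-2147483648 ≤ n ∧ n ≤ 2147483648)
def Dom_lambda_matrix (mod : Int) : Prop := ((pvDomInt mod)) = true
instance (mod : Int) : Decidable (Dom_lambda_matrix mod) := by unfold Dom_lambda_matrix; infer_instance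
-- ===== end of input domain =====

-- B replaces A's per-pair big-integer test (2**i+2**j)%(mod+1) by a modular-power table plus an
-- inverted index from residue to column list, gathering the 1-columns of each row from two buckets
-- (objective: faster — no huge 2**i integers, no per-pair trial).

-- ===== PORT A =====
/- literal port of A: nested loops over range(mod); 2**i is `2 ^ i.toNat` (i ≥ 0 on every
   element of the range); Python `%` is PySem.Int.mod -/
def lambda_matrix (mod : Int) : List (List Int) :=
  (PySem.List.pyRange 0 mod).foldl (fun l_m i =>
    l_m ++ [(PySem.List.pyRange 0 mod).foldl (fun line j =>
      line ++ [if PySem.Int.mod (2 ^ i.toNat + 2 ^ j.toNat) (mod + 1) = 0 ∨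
                  PySem.Int.mod (2 ^ i.toNat + 2 ^ j.toNat) (mod + 1) = 1
               then (1 : Int) else (0 : Int)]) []]) []

-- ===== PORT B =====
/- literal port of Source B: pow(2,k,M) is PySem.Int.powMod; `index.setdefault(r, []).append(j)` is
   Dict.modify r [] (· ++ [j]); `row[j] = 1` is pySetD (every j stored in the index is a valid
   in-range index, so Python never raises there) -/
def lambda_matrix_alt (mod : Int) : List (List Int) :=
  let M := mod + 1
  let res := (PySem.List.pyRange 0 mod).map (fun k => PySem.Int.powMod 2 k.toNat M)
  let index := (PySem.List.enumerate res).foldl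
      (fun d p => d.modify p.2 [] (fun l => l ++ [p.1])) PySem.Dict.empty
  res.foldl (fun l_m r =>
    l_m ++ [let t0 := PySem.Int.mod (-r) M
            let t1 := PySem.Int.mod (1 - r) M
            let row := List.replicate mod.toNat (0 : Int)
            let cols := index.getD t0 []
            let cols := if t1 ≠ t0 then cols ++ index.getD t1 [] else cols
            cols.foldl (fun row j => PySem.List.pySetD row j 1) row]) []

-- ===== PRECONDITION & SPEC =====
def Spec_lambda_matrix (mod : Int) (out : List (List Int)) : Prop := out = lambda_matrix_alt mod
instance (mod : Int) (out : List (List Int)) : Decidable (Spec_lambda_matrix mod out) := by unfold Spec_lambda_matrix; infer_instance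

-- ===== CLAIM (what is proved, stated in full; the proofs are below) =====
def Claim_equal_lambda_matrix : Prop := ∀ (mod : Int), Dom_lambda_matrix mod → Spec_lambda_matrix mod (lambda_matrix mod)

-- ===== LEMMAS AND PROOFS =====

-- setting index m < n of a map-over-range list rewrites the mapped function at m
lemma pv_set_map_range {n m : Nat} (v : Int) (f : Nat → Int) :
    ((List.range n).map f).set m v
      = (List.range n).map (fun (k : Nat) => if k = m then v else f k) := by
  apply List.ext_getElem
  · rw [List.length_set, List.length_map, List.length_map]
  · intro k hk hk'
    simp only [List.getElem_set, List.getElem_map, List.getElem_range]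
    split_ifs with h1 h2 h2 <;> first | rfl | omega

-- the `for j in cols: row[j] = 1` fold sets exactly the members of cols to 1
lemma pv_setfold_ones {n : Nat} (cols : List Int) (f : Nat → Int)
    (h : ∀ j ∈ cols, 0 ≤ j ∧ j < (n : Int)) :
    cols.foldl (fun row j => PySem.List.pySetD row j 1) ((List.range n).map f)
      = (List.range n).map (fun (k : Nat) => if ((k : Int) ∈ cols) then (1 : Int) else f k) := by
  induction cols generalizing f with
  | nil => simp
  | cons j rest ih =>
    obtain ⟨hj0, hjn⟩ := h j (List.mem_cons_self ..)
    have hjn' : j.toNat < n := by omega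
    simp only [List.foldl_cons, PySem.List.pySetD_of_nonneg _ _ hj0,
      pv_set_map_range 1 f, ih _ (fun x hx => h x (List.mem_cons_of_mem _ hx))]
    refine List.map_congr_left (fun k _ => ?_)
    by_cases hk : (k : Int) ∈ rest
    · simp [hk]
    · by_cases he : k = j.toNat
      · have hkj : (k : Int) = j := by omega
        rw [if_neg hk, if_pos he, if_pos (show ((k : Int) ∈ j :: rest) by simp [hkj])]
      · have hkj : (k : Int) ≠ j := by omega
        rw [if_neg hk, if_neg he, if_neg (show ¬((k : Int) ∈ j :: rest) by simp [hkj, hk])]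

lemma pv_mod_add_eq_zero_iff (M a b : Int) :
    (a + b) % M = 0 ↔ b % M = (-(a % M)) % M := by
  have h1 : (-(a % M)) % M = (-a) % M := Int.ModEq.neg (Int.emod_emod_of_dvd a dvd_rfl)
  rw [h1]
  calc (a + b) % M = 0 ↔ (b - -a) % M = 0 := by rw [show b - -a = a + b by ring]
    _ ↔ b % M = (-a) % M := Int.emod_eq_emod_iff_emod_sub_eq_zero.symm

lemma pv_mod_add_eq_one_iff (M a b : Int) (hM : 1 < M) :
    (a + b) % M = 1 ↔ b % M = (1 - a % M) % M := by
  have h1 : (1 - a % M) % M = (1 - a) % M :=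
    Int.ModEq.sub (Int.ModEq.refl 1) (Int.emod_emod_of_dvd a dvd_rfl)
  have h2 : (1 : Int) % M = 1 := Int.emod_eq_of_lt (by omega) (by omega)
  rw [h1]
  calc (a + b) % M = 1 ↔ (a + b) % M = 1 % M := by rw [h2]
    _ ↔ (a + b - 1) % M = 0 := Int.emod_eq_emod_iff_emod_sub_eq_zero
    _ ↔ (b - (1 - a)) % M = 0 := by rw [show a + b - 1 = b - (1 - a) by ring]
    _ ↔ b % M = (1 - a) % M := Int.emod_eq_emod_iff_emod_sub_eq_zero.symm

lemma pv_mem_bucket {n : Nat} (g : Nat → Int) (t x : Int) :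
    x ∈ ((PySem.List.enumerate ((List.range n).map g)).filter (fun p => p.2 == t)).map
        (fun p => p.1)
      ↔ ∃ k : Nat, k < n ∧ x = (k : Int) ∧ g k = t := by
  simp only [List.mem_map, List.mem_filter, PySem.List.mem_enumerate_iff]
  constructor
  · rintro ⟨p, ⟨⟨k, hk, rfl⟩, h2⟩, rfl⟩
    simp only [List.length_map, List.length_range] at hk
    refine ⟨k, by simpa using hk, by simp, ?_⟩
    simpa using h2
  · rintro ⟨k, hk, rfl, hg⟩
    exact ⟨(↑k, g k), ⟨⟨k, by simpa using hk, by simp⟩, by simpa using hg⟩, rfl⟩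

lemma pv_index_getD {n : Nat} (g : Nat → Int) (t : Int) :
    ((PySem.List.enumerate ((List.range n).map g)).foldl
        (fun d p => d.modify p.2 [] (fun l => l ++ [p.1])) PySem.Dict.empty).getD t []
      = ((PySem.List.enumerate ((List.range n).map g)).filter (fun p => p.2 == t)).map
          (fun p => p.1) := by
  have hswap : ∀ (l : List (Int × Int)) (d : PySem.Dict Int (List Int)),
      l.foldl (fun d p => d.modify p.2 [] (fun s => s ++ [p.1])) d
        = (l.map Prod.swap).foldl (fun d q => d.modify q.1 [] (fun s => s ++ [q.2])) d := by
    intro l d; rw [List.foldl_map]; rfl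
  rw [hswap, PySem.Dict.getD_foldl_modify_append]
  simp [List.filter_map, List.map_map, Function.comp_def]


lemma pv_main (mod : Int) : lambda_matrix mod = lambda_matrix_alt mod := by
  by_cases hm : mod ≤ 0
  · simp [lambda_matrix, lambda_matrix_alt, PySem.List.pyRange_one_eq_nil hm]
  · push Not at hm
    obtain ⟨n, rfl⟩ : ∃ n : Nat, mod = (n : Int) := ⟨mod.toNat, by omega⟩
    have hn : 0 < n := by exact_mod_cast hm
    have hM : (1 : Int) < (n : Int) + 1 := by omega
    have hM0 : (0 : Int) < (n : Int) + 1 := by omega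
    rw [lambda_matrix, lambda_matrix_alt]
    simp only [PySem.List.pyRange_zero_natCast, List.foldl_map,
      PySem.List.foldl_append_singleton_eq_map, List.nil_append, List.map_map,
      Function.comp_def, Int.toNat_natCast, PySem.Int.powMod,
      PySem.Int.mod_eq_emod_of_pos hM0]
    refine List.map_congr_left (fun i hi => ?_)
    rw [List.mem_range] at hi
    rw [show (List.replicate n (0:Int)) = (List.range n).map (fun _ => (0:Int)) by simp,
        pv_index_getD, pv_index_getD, pv_setfold_ones]
    · refine List.map_congr_left (fun k hk => ?_)
      rw [List.mem_range] at hk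
      refine if_congr ?_ rfl rfl
      rw [pv_mod_add_eq_zero_iff ((n:Int)+1) (2^i) (2^k),
          pv_mod_add_eq_one_iff ((n:Int)+1) (2^i) (2^k) hM]
      by_cases hT : (1 - 2^i % ((n:Int)+1)) % ((n:Int)+1) ≠ (-(2^i % ((n:Int)+1))) % ((n:Int)+1)
      · rw [if_pos hT, List.mem_append, pv_mem_bucket, pv_mem_bucket]
        constructor
        · rintro (h | h)
          · exact Or.inl ⟨k, hk, rfl, h⟩
          · exact Or.inr ⟨k, hk, rfl, h⟩
        · rintro (⟨k', _, hkk, h⟩ | ⟨k', _, hkk, h⟩)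
          · exact Or.inl (by rwa [show k = k' from by exact_mod_cast hkk])
          · exact Or.inr (by rwa [show k = k' from by exact_mod_cast hkk])
      · push Not at hT
        rw [if_neg (by simp [hT]), pv_mem_bucket, hT]
        constructor
        · rintro (h | h)
          · exact ⟨k, hk, rfl, h⟩
          · exact ⟨k, hk, rfl, h⟩
        · rintro ⟨k', _, hkk, h⟩
          exact Or.inl (by rwa [show k = k' from by exact_mod_cast hkk])
    · intro j hj
      have hb : ∀ t : Int, j ∈ ((PySem.List.enumerate ((List.range n).map (fun k => 2^k % ((n:Int)+1)))).filter
            (fun p => p.2 == t)).map (fun p => p.1) → 0 ≤ j ∧ j < (n : Int) := by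
        intro t ht
        obtain ⟨k, hk, rfl, -⟩ := (pv_mem_bucket _ t j).mp ht
        constructor <;> [positivity; exact_mod_cast hk]
      split_ifs at hj with hT
      · rcases List.mem_append.mp hj with h | h
        · exact hb _ h
        · exact hb _ h
      · exact hb _ hj

-- ===== VERDICT (by name: the statement is the Claim_ definition above) =====
theorem lambda_matrix_spec : Claim_equal_lambda_matrix := by
  intro mod _
  show lambda_matrix mod = lambda_matrix_alt mod
  exact pv_main mod
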